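-- pv_equiv track=rewrite | github.com/Adisha2/45-Days-Code | Day 32 - TLG.py | find_winner_and_lead
-- ===== SOURCE A (Python) =====
-- def find_winner_and_lead(n, scores):
--     cumulative_score1 = 0
--     cumulative_score2 = 0
--     max_lead = 0
--     winner = 0
--
--     for score in scores:
--         Si, Ti = score
--         cumulative_score1 += Si
--         cumulative_score2 += Ti
--
--         if cumulative_score1 > cumulative_score2:
--             lead = cumulative_score1 - cumulative_score2
--             if lead > max_lead:
--                 max_lead = lead
--                 winner = 1
--         else:
--             lead = cumulative_score2 - cumulative_score1
--             if lead > max_lead: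
--                 max_lead = lead
--                 winner = 2
--
--     return winner, max_lead
-- ===== SOURCE B (Python) =====
-- def find_winner_and_lead(n, scores):
--     # pass 1: prefix-difference table
--     diffs = []
--     d = 0
--     for s, t in scores:
--         d += s - t
--         diffs.append(d)
--     # pass 2: scan for the maximal absolute lead (first strict improvement wins)
--     winner = 0
--     max_lead = 0
--     for d in diffs:
--         if abs(d) > max_lead:
--             max_lead = abs(d)
--             winner = 1 if d > 0 else 2
--     return winner, max_lead
-- ===== Notes on version B (the rewrite author's own statement) =====
-- stated objective: simpler
-- what changed: B decomposes the single stateful loop (two cumulative totals, branch on which side leads) into two passes: first build the prefix-difference table, then a scan tracking the maximal absolute difference and its sign.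
import Mathlib
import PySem

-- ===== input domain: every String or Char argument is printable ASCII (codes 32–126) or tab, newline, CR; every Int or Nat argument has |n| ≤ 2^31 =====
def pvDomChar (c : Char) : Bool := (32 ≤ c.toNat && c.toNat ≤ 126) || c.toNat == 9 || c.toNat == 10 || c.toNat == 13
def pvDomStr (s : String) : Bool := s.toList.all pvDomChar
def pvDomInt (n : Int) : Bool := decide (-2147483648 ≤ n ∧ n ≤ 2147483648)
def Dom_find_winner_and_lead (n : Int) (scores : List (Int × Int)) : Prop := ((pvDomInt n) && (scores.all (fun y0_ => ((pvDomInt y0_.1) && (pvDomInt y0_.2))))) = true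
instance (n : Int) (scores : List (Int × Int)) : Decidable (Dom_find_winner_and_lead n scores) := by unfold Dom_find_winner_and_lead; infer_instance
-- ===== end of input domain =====

-- ===== PORT A =====
-- literal port of A: one fold carrying (cumulative_score1, cumulative_score2, max_lead, winner)
def find_winner_and_lead (n : Int) (scores : List (Int × Int)) : Int × Int :=
  let st := scores.foldl (fun (st : Int × Int × Int × Int) sc =>
    let c1 := st.1 + sc.1
    let c2 := st.2.1 + sc.2
    if c1 > c2 then
      let lead := c1 - c2
      if lead > st.2.2.1 then (c1, c2, lead, 1) else (c1, c2, st.2.2.1, st.2.2.2)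
    else
      let lead := c2 - c1
      if lead > st.2.2.1 then (c1, c2, lead, 2) else (c1, c2, st.2.2.1, st.2.2.2))
    (0, 0, 0, 0)
  (st.2.2.2, st.2.2.1)

-- ===== PORT B =====
-- pass 1 of B: the prefix-difference table
def fwlDiffs (scores : List (Int × Int)) (d : Int) : List Int :=
  match scores with
  | [] => []
  | (s, t) :: rest => (d + (s - t)) :: fwlDiffs rest (d + (s - t))

-- port of B: build the prefix-difference table, then scan it for the maximal |d|
def find_winner_and_lead_alt (n : Int) (scores : List (Int × Int)) : Int × Int :=
  let diffs := fwlDiffs scores 0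
  diffs.foldl (fun (st : Int × Int) d =>
    if |d| > st.2 then (if d > 0 then 1 else 2, |d|) else st) (0, 0)

-- ===== PRECONDITION & SPEC =====
def Spec_find_winner_and_lead (n : Int) (scores : List (Int × Int)) (out : Int × Int) : Prop := out = find_winner_and_lead_alt n scores
instance (n : Int) (scores : List (Int × Int)) (out : Int × Int) : Decidable (Spec_find_winner_and_lead n scores out) := by unfold Spec_find_winner_and_lead; infer_instance

-- ===== CLAIM (what is proved, stated in full; the proofs are below) =====
def Claim_equal_find_winner_and_lead : Prop := ∀ (n : Int) (scores : List (Int × Int)), Dom_find_winner_and_lead n scores → Spec_find_winner_and_lead n scores (find_winner_and_lead n scores)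

-- ===== LEMMAS AND PROOFS =====
lemma fwl_key : ∀ (scores : List (Int × Int)) (c1 c2 ml w : Int),
    (let st := scores.foldl (fun (st : Int × Int × Int × Int) sc =>
      let c1 := st.1 + sc.1
      let c2 := st.2.1 + sc.2
      if c1 > c2 then
        let lead := c1 - c2
        if lead > st.2.2.1 then (c1, c2, lead, 1) else (c1, c2, st.2.2.1, st.2.2.2)
      else
        let lead := c2 - c1
        if lead > st.2.2.1 then (c1, c2, lead, 2) else (c1, c2, st.2.2.1, st.2.2.2))
      (c1, c2, ml, w)
     (st.2.2.2, st.2.2.1))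
    = (fwlDiffs scores (c1 - c2)).foldl (fun (st : Int × Int) d =>
        if |d| > st.2 then (if d > 0 then 1 else 2, |d|) else st) (w, ml) := by
  intro scores
  induction scores with
  | nil => intro c1 c2 ml w; rfl
  | cons sc rest ih =>
    intro c1 c2 ml w
    obtain ⟨s, t⟩ := sc
    simp only [List.foldl, fwlDiffs]
    have hd : c1 - c2 + (s - t) = (c1 + s) - (c2 + t) := by ring
    rw [hd]
    by_cases h : c1 + s > c2 + t
    · have habs : |(c1 + s) - (c2 + t)| = (c1 + s) - (c2 + t) := abs_of_pos (by omega)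
      simp only [if_pos h, habs, if_pos (show (c1 + s) - (c2 + t) > (0:Int) from by omega)]
      by_cases h2 : (c1 + s) - (c2 + t) > ml
      · simp only [if_pos h2]; exact ih _ _ _ _
      · simp only [if_neg h2]; exact ih _ _ _ _
    · have habs : |(c1 + s) - (c2 + t)| = (c2 + t) - (c1 + s) := by
        rw [abs_of_nonpos (by omega)]; ring
      simp only [if_neg h, habs, if_neg (show ¬ ((c1 + s) - (c2 + t) > (0:Int)) from by omega)]
      by_cases h2 : (c2 + t) - (c1 + s) > ml
      · simp only [if_pos h2]; exact ih _ _ _ _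
      · simp only [if_neg h2]; exact ih _ _ _ _

-- ===== VERDICT (by name: the statement is the Claim_ definition above) =====
theorem find_winner_and_lead_spec : Claim_equal_find_winner_and_lead := by
  intro n scores _
  unfold Spec_find_winner_and_lead find_winner_and_lead find_winner_and_lead_alt
  have := fwl_key scores 0 0 0 0
  simpa using this
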